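-- pv_equiv track=rewrite | github.com/MohammadForouhesh/persian-relatio | src/syntactic_role_labeling.py | concat_srl
-- ===== SOURCE A (Python) =====
-- from typing import Dict, List, Optional, Tuple, Union, Generator, Any
--
-- def concat_srl(rel_tagged: Generator[Tuple[str, str], None, None]) -> Generator[Tuple[str, str], None, None]:
--     rel_tagged = list(rel_tagged)
--     ind = 0
--     while ind < len(rel_tagged):
--         out_str = rel_tagged[ind][0]
--         j = ind + 1
--         while j < len(rel_tagged):
--             if rel_tagged[j][1] == rel_tagged[ind][1]:  out_str += f' {rel_tagged[j][0]}'
--             else:                                       break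
--             j += 1
--         yield rel_tagged[ind][1], out_str
--         ind = j
-- ===== SOURCE B (Python) =====
-- from typing import Generator, Tuple
--
--
-- def concat_srl(rel_tagged: Generator[Tuple[str, str], None, None]) -> Generator[Tuple[str, str], None, None]:
--     out = []
--     for word, tag in reversed(list(rel_tagged)):
--         if out and out[-1][0] == tag:
--             out[-1] = (tag, word + ' ' + out[-1][1])
--         else:
--             out.append((tag, word))
--     yield from reversed(out)
-- ===== Notes on version B (the rewrite author's own statement) =====
-- stated objective: alternative
-- what changed: Replaces A's forward outer-index loop with a nested scan-ahead inner loop by a single backward pass that folds each pair into the result built so far, merging a word into the adjacent group when its tag matches and starting a new group otherwise, then emits the groups in reverse.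
import Mathlib
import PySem

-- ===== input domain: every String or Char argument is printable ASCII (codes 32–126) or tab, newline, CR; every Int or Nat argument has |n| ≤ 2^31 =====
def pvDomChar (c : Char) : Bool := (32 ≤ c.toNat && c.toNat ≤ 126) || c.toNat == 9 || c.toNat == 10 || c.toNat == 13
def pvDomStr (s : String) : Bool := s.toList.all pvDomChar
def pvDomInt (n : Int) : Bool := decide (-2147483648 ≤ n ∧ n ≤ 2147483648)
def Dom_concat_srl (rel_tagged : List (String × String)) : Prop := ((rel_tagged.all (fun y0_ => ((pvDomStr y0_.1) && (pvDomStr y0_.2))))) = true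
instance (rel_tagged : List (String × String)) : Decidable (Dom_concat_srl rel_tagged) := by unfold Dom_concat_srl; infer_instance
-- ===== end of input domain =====

-- B replaces A's forward scan-ahead grouping by one backward pass merging each pair into the head of the result built so far — alternative decomposition; return value only (both Pythons are generators).

-- ===== PORT A =====
-- inner while loop of A: scan ahead while the tag matches, accumulating `out_str`
def srlInner (tag : String) (acc : String) : List (String × String) → String × List (String × String)
  | [] => (acc, [])
  | (w, t) :: rest =>
      if t == tag then srlInner tag (acc ++ " " ++ w) rest
      else (acc, (w, t) :: rest)

-- needed only for the termination of the outer loop below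
theorem srlInner_snd_length (tag : String) : ∀ (xs : List (String × String)) (acc : String),
    (srlInner tag acc xs).2.length ≤ xs.length := by
  intro xs
  induction xs with
  | nil => intro acc; simp [srlInner]
  | cons x rest ih =>
      intro acc
      obtain ⟨w, t⟩ := x
      by_cases h : t == tag
      · simpa [srlInner, h] using Nat.le_succ_of_le (ih _)
      · simp [srlInner, h]

-- outer while loop of A: emit (tag, out_str), resume at index j
def concat_srl (rel_tagged : List (String × String)) : List (String × String) :=
  match rel_tagged with
  | [] => []
  | (w, t) :: rest =>
      (t, (srlInner t w rest).1) :: concat_srl (srlInner t w rest).2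
termination_by rel_tagged.length
decreasing_by
  exact Nat.lt_succ_of_le (srlInner_snd_length t rest w)

-- ===== PORT B =====
-- B's loop body. B keeps `out` newest-group-first (Python appends at the end and finally yields
-- reversed(out)); here the Lean list is that emission order directly, so Python's out[-1] is the head:
-- merge (word, tag) into the head group if the tag matches, else cons a new group (Python's append)
def srlMerge (p : String × String) (out : List (String × String)) : List (String × String) :=
  match out with
  | (t, s) :: rest => if t == p.2 then (t, p.1 ++ " " ++ s) :: rest else (p.2, p.1) :: (t, s) :: rest
  | [] => [(p.2, p.1)]

-- B iterates over reversed(list(rel_tagged)) threading `out` through srlMerge: a right fold;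
-- the final `yield from reversed(out)` is the identity in this head-first representation
def concat_srl_alt (rel_tagged : List (String × String)) : List (String × String) :=
  rel_tagged.foldr srlMerge []

-- ===== PRECONDITION & SPEC =====
def Spec_concat_srl (rel_tagged : List (String × String)) (out : List (String × String)) : Prop := out = concat_srl_alt rel_tagged
instance (rel_tagged : List (String × String)) (out : List (String × String)) : Decidable (Spec_concat_srl rel_tagged out) := by unfold Spec_concat_srl; infer_instance

-- ===== CLAIM (what is proved, stated in full; the proofs are below) =====
def Claim_equal_concat_srl : Prop := ∀ (rel_tagged : List (String × String)), Dom_concat_srl rel_tagged → Spec_concat_srl rel_tagged (concat_srl rel_tagged)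

-- ===== LEMMAS AND PROOFS =====

-- the accumulator is a prefix: srlInner only appends to it, and the remainder ignores it
theorem srlInner_acc (tag : String) : ∀ (xs : List (String × String)) (x y : String),
    (srlInner tag (x ++ y) xs).1 = x ++ (srlInner tag y xs).1
    ∧ (srlInner tag (x ++ y) xs).2 = (srlInner tag y xs).2 := by
  intro xs
  induction xs with
  | nil => intro x y; simp [srlInner]
  | cons p rest ih =>
      intro x y
      obtain ⟨w, t⟩ := p
      by_cases h : (t == tag) = true
      · have := ih x (y ++ " " ++ w)
        simpa [srlInner, h, String.append_assoc] using this
      · simp [srlInner, h]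

-- A satisfies B's one-step recurrence: processing one more leading pair = merging it into A's result for the tail
theorem concat_srl_cons (w t : String) (xs : List (String × String)) :
    concat_srl ((w, t) :: xs) = srlMerge (w, t) (concat_srl xs) := by
  match xs with
  | [] => simp [concat_srl, srlInner, srlMerge]
  | (w2, t2) :: rest =>
      by_cases h : (t2 == t) = true
      · have ht : t2 = t := eq_of_beq h
        subst ht
        have hacc := srlInner_acc t2 rest (w ++ " ") w2
        rw [concat_srl, concat_srl]
        simp only [srlInner, beq_self_eq_true, if_true, srlMerge, hacc.1, hacc.2]
      · rw [concat_srl, concat_srl]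
        simp only [srlInner, h, Bool.false_eq_true, if_false, srlMerge]
        rw [concat_srl]

-- main equivalence by plain list induction
theorem concat_srl_eq : ∀ (xs : List (String × String)), concat_srl xs = xs.foldr srlMerge [] := by
  intro xs
  induction xs with
  | nil => simp [concat_srl]
  | cons p xs ih =>
      obtain ⟨w, t⟩ := p
      rw [List.foldr_cons, ← ih, concat_srl_cons]

-- ===== VERDICT (by name: the statement is the Claim_ definition above) =====
theorem concat_srl_spec : Claim_equal_concat_srl := by
  intro rel_tagged _
  unfold Spec_concat_srl concat_srl_alt
  exact concat_srl_eq rel_tagged
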